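-- pv_equiv track=rewrite | github.com/KarahanS/Bachelor-University-Projects | CmpE300 - Analysis of Algorithms/project1/project1.py | func
-- ===== SOURCE A (Python) =====
-- def func(X, n):
--     y = 0
--     for i in range(n):
--         if(X[i] == 0):
--             for j in range(i, n):
--                 k = n
--                 while(k >= 1):
--                     y = y + 1
--                     k = k // 2
--         else:
--             for m in range(i, n):
--                 for t in range(1, n + 1):
--                     x = n
--                     while(x>0):
--                         x = x - t
--                         y = y + 1
--     return y
-- ===== SOURCE B (Python) =====
-- def func(X, n):
--     # Precompute the two per-(i,j) operation counts once, then one weighted pass over i.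
--     if n <= 0:
--         return 0
--     L = 0
--     k = n
--     while k >= 1:
--         L += 1
--         k //= 2
--     S = 0
--     for t in range(1, n + 1):
--         x = n
--         while x > 0:
--             x -= t
--             S += 1
--     total = 0
--     for i in range(n):
--         total += (n - i) * (L if X[i] == 0 else S)
--     return total
-- ===== Notes on version B (the rewrite author's own statement) =====
-- stated objective: faster
-- what changed: B computes the two inner-loop operation counts (L for the halving loop, S = sum over t of the subtract-t step counts) once, then replaces A's nested i/j/m/t loops by a single weighted pass adding (n-i)*L or (n-i)*S per index.
import Mathlib
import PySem

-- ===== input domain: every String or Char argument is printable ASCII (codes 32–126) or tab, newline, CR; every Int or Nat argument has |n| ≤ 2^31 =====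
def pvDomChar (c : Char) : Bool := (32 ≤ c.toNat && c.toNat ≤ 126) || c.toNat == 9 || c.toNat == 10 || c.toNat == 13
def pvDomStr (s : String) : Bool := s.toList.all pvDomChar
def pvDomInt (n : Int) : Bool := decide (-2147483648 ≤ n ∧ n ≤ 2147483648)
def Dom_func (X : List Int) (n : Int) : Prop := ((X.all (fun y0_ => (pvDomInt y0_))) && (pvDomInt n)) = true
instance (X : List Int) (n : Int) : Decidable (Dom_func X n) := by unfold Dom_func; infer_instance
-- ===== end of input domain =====

-- B precomputes the two inner operation counts once and does one weighted pass over i (faster).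

-- ===== PORT A =====
-- while k >= 1: y += 1; k //= 2   (fuel only makes it total; k.toNat + 1 steps always suffice)
def funcWhileK : Nat → Int → Int → Int
  | 0, _, y => y
  | fuel + 1, k, y =>
    if 1 ≤ k then funcWhileK fuel (PySem.Int.floordiv k 2) (y + 1) else y

-- while x > 0: x -= t; y += 1   (fuel only makes it total; x.toNat + 1 steps suffice for t ≥ 1)
def funcWhileX : Nat → Int → Int → Int → Int
  | 0, _, _, y => y
  | fuel + 1, x, t, y =>
    if 0 < x then funcWhileX fuel (x - t) t (y + 1) else y

def func (X : List Int) (n : Int) : Int :=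
  (PySem.List.pyRange 0 n 1).foldl (fun y i =>
    if PySem.List.pyGetD X i 0 == 0 then
      (PySem.List.pyRange i n 1).foldl (fun y _ => funcWhileK (n.toNat + 1) n y) y
    else
      (PySem.List.pyRange i n 1).foldl (fun y _ =>
        (PySem.List.pyRange 1 (n + 1) 1).foldl (fun y t => funcWhileX (n.toNat + 1) n t y) y) y) 0

-- ===== PORT B =====
-- L = 0; k = n; while k >= 1: L += 1; k //= 2   (fuel only makes it total)
def funcAltL : Nat → Int → Int → Int
  | 0, _, L => L
  | fuel + 1, k, L =>
    if 1 ≤ k then funcAltL fuel (PySem.Int.floordiv k 2) (L + 1) else L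

-- x = n; while x > 0: x -= t; S += 1   (fuel only makes it total)
def funcAltStep : Nat → Int → Int → Int → Int
  | 0, _, _, S => S
  | fuel + 1, x, t, S =>
    if 0 < x then funcAltStep fuel (x - t) t (S + 1) else S

def func_alt (X : List Int) (n : Int) : Int :=
  if n ≤ 0 then 0
  else
    let L := funcAltL (n.toNat + 1) n 0
    let S := (PySem.List.pyRange 1 (n + 1) 1).foldl (fun S t => funcAltStep (n.toNat + 1) n t S) 0
    (PySem.List.pyRange 0 n 1).foldl
      (fun total i => total + (n - i) * (if PySem.List.pyGetD X i 0 == 0 then L else S)) 0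

-- ===== PRECONDITION & SPEC =====
-- Pre_ excludes exactly the inputs where Python A raises IndexError (X[i] with n > len(X) and n > 0).
def Pre_func (X : List Int) (n : Int) : Prop := n ≤ (X.length : Int) ∨ n ≤ 0
instance (X : List Int) (n : Int) : Decidable (Pre_func X n) := by unfold Pre_func; infer_instance
def pvWitness_func : List Int × Int := ([0, 5, 0, -3], 4)

def Spec_func (X : List Int) (n : Int) (out : Int) : Prop := out = func_alt X n
instance (X : List Int) (n : Int) (out : Int) : Decidable (Spec_func X n out) := by unfold Spec_func; infer_instance

-- ===== CLAIM (what is proved, stated in full; the proofs are below) =====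
def Claim_equal_func : Prop := ∀ (X : List Int) (n : Int), Dom_func X n → Pre_func X n → Spec_func X n (func X n)

-- ===== LEMMAS AND PROOFS =====

-- generic: a foldl whose step is a shift by an amount depending only on the element
theorem pv_foldl_shift {α : Type} (f : Int → α → Int) (hf : ∀ y a, f y a = y + f 0 a) :
    ∀ (l : List α) (y : Int), l.foldl f y = y + l.foldl f 0 := by
  intro l
  induction l with
  | nil => intro y; simp
  | cons a l ih =>
    intro y
    simp only [List.foldl_cons]
    rw [ih (f y a), ih (f 0 a), hf y a]
    ring

-- a foldl that adds a constant c per element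
theorem pv_foldl_repeat {α : Type} (g : Int → Int) (c : Int) (hg : ∀ y, g y = y + c) :
    ∀ (l : List α) (y : Int), l.foldl (fun y _ => g y) y = y + (l.length : Int) * c := by
  intro l
  induction l with
  | nil => intro y; simp
  | cons a l ih =>
    intro y
    simp only [List.foldl_cons, List.length_cons]
    rw [ih (g y), hg y]
    push_cast
    ring

theorem funcWhileK_shift : ∀ (fuel : Nat) (k y : Int),
    funcWhileK fuel k y = y + funcWhileK fuel k 0 := by
  intro fuel
  induction fuel with
  | zero => intro k y; simp [funcWhileK]
  | succ fuel ih =>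
    intro k y
    by_cases h : 1 ≤ k
    · simp only [funcWhileK, if_pos h]
      rw [ih _ (y + 1), ih _ (0 + 1)]
      ring
    · simp [funcWhileK, h]

theorem funcWhileX_shift : ∀ (fuel : Nat) (x t y : Int),
    funcWhileX fuel x t y = y + funcWhileX fuel x t 0 := by
  intro fuel
  induction fuel with
  | zero => intro x t y; simp [funcWhileX]
  | succ fuel ih =>
    intro x t y
    by_cases h : 0 < x
    · simp only [funcWhileX, if_pos h]
      rw [ih _ _ (y + 1), ih _ _ (0 + 1)]
      ring
    · simp [funcWhileX, h]

theorem funcAltL_eq : ∀ (fuel : Nat) (k a : Int), funcAltL fuel k a = funcWhileK fuel k a := by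
  intro fuel
  induction fuel with
  | zero => intro k a; simp [funcAltL, funcWhileK]
  | succ fuel ih =>
    intro k a
    simp only [funcAltL, funcWhileK]
    by_cases h : 1 ≤ k
    · simp only [if_pos h]; exact ih _ _
    · simp [h]

theorem funcAltStep_eq : ∀ (fuel : Nat) (x t a : Int),
    funcAltStep fuel x t a = funcWhileX fuel x t a := by
  intro fuel
  induction fuel with
  | zero => intro x t a; simp [funcAltStep, funcWhileX]
  | succ fuel ih =>
    intro x t a
    simp only [funcAltStep, funcWhileX]
    by_cases h : 0 < x
    · simp only [if_pos h]; exact ih _ _ _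
    · simp [h]

-- the inner t-fold of A shifts its accumulator
theorem pv_innerS_shift (n : Int) (y : Int) :
    (PySem.List.pyRange 1 (n + 1) 1).foldl (fun y t => funcWhileX (n.toNat + 1) n t y) y
      = y + (PySem.List.pyRange 1 (n + 1) 1).foldl (fun y t => funcWhileX (n.toNat + 1) n t y) 0 := by
  exact pv_foldl_shift _ (fun y t => funcWhileX_shift (n.toNat + 1) n t y) _ y

theorem func_spec_aux (X : List Int) (n : Int) : func X n = func_alt X n := by
  by_cases hn : n ≤ 0
  · unfold func func_alt
    rw [PySem.List.pyRange_one_eq_nil (by omega : n ≤ 0)]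
    simp [hn]
  · unfold func func_alt
    simp only [hn, if_false]
    set cK := funcWhileK (n.toNat + 1) n 0 with hcK
    set cS := (PySem.List.pyRange 1 (n + 1) 1).foldl (fun y t => funcWhileX (n.toNat + 1) n t y) 0 with hcS
    have hbody : ∀ (y i : Int), i ∈ PySem.List.pyRange 0 n 1 →
        (if PySem.List.pyGetD X i 0 == 0 then
          (PySem.List.pyRange i n 1).foldl (fun y _ => funcWhileK (n.toNat + 1) n y) y
        else
          (PySem.List.pyRange i n 1).foldl (fun y _ =>
            (PySem.List.pyRange 1 (n + 1) 1).foldl (fun y t => funcWhileX (n.toNat + 1) n t y) y) y)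
        = y + (n - i) * (if PySem.List.pyGetD X i 0 == 0 then cK else cS) := by
      intro y i hi
      rw [PySem.List.mem_pyRange_one] at hi
      have hlen : ((PySem.List.pyRange i n 1).length : Int) = n - i := by
        rw [PySem.List.length_pyRange_one]; omega
      by_cases hz : PySem.List.pyGetD X i 0 == 0
      · simp only [hz, if_pos]
        rw [pv_foldl_repeat (fun y => funcWhileK (n.toNat + 1) n y) cK
            (fun y => funcWhileK_shift (n.toNat + 1) n y) _ y, hlen]
      · simp only [hz, if_neg, Bool.false_eq_true, not_false_iff]
        rw [pv_foldl_repeat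
            (fun y => (PySem.List.pyRange 1 (n + 1) 1).foldl
              (fun y t => funcWhileX (n.toNat + 1) n t y) y) cS
            (fun y => pv_innerS_shift n y) _ y, hlen]
    have hA : (PySem.List.pyRange 0 n 1).foldl (fun y i =>
        if PySem.List.pyGetD X i 0 == 0 then
          (PySem.List.pyRange i n 1).foldl (fun y _ => funcWhileK (n.toNat + 1) n y) y
        else
          (PySem.List.pyRange i n 1).foldl (fun y _ =>
            (PySem.List.pyRange 1 (n + 1) 1).foldl (fun y t => funcWhileX (n.toNat + 1) n t y) y) y) 0
      = (PySem.List.pyRange 0 n 1).foldl (fun y i =>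
          y + (n - i) * (if PySem.List.pyGetD X i 0 == 0 then cK else cS)) 0 := by
      apply List.foldl_ext
      intro y i hi
      exact hbody y i hi
    rw [hA]
    have hL : funcAltL (n.toNat + 1) n 0 = cK := funcAltL_eq (n.toNat + 1) n 0
    have hS : (PySem.List.pyRange 1 (n + 1) 1).foldl (fun S t => funcAltStep (n.toNat + 1) n t S) 0 = cS := by
      rw [hcS]
      apply List.foldl_ext
      intro a t _
      exact funcAltStep_eq (n.toNat + 1) n t a
    rw [hL, hS]

-- ===== VERDICT (by name: the statement is the Claim_ definition above) =====
theorem func_spec : Claim_equal_func := by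
  intro X n _ _
  unfold Spec_func
  exact func_spec_aux X n
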